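-- pv_equiv track=rewrite | github.com/hanproj/hanproject | annotator_comparison.py | are_these_two_marker2rhyme_word_dictionaries_equal
-- ===== SOURCE A (Python) =====
-- def are_these_two_marker2rhyme_word_dictionaries_equal(m2rw_a, m2rw_b):
--     funct_name = 'are_these_two_marker2rhyme_word_dictionaries_equal()'
--     retval = False
--     # if the number of markers is different, then they are not the same
--     if len(m2rw_a) != len(m2rw_b):
--         return retval
--     len2rw_a = convert_marker2rw_word_to_len2rw_word_dict(m2rw_a)
--     len2rw_b = convert_marker2rw_word_to_len2rw_word_dict(m2rw_b)
--     for num_rw in len2rw_a: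
--         try:
--             list_of_rw_lists_a = len2rw_a[num_rw] # this is a list of lists
--             list_of_rw_lists_b = len2rw_b[num_rw]
--         except IndexError as ie:
--             return retval
--         except KeyError as ke:
--             return retval
--         if len(list_of_rw_lists_a) != len(list_of_rw_lists_b):
--             return retval
--
--         for rw_list_a in list_of_rw_lists_a:
--             rw_list_a.sort()
--             if rw_list_a not in list_of_rw_lists_b:
--                 return retval
--     retval = True
--     return retval
--
-- def convert_marker2rw_word_to_len2rw_word_dict(m2rw_word_d):
--     funct_name = 'convert_marker2rw_word_to_len2rw_word_dict()'
--     retval = {}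
--     for m in m2rw_word_d:
--         rw_list = m2rw_word_d[m]
--         rw_list.sort()
--         if len(rw_list) not in retval:
--             retval[len(rw_list)] = []
--         retval[len(rw_list)].append(rw_list)
--     return retval
-- ===== SOURCE B (Python) =====
-- def are_these_two_marker2rhyme_word_dictionaries_equal(m2rw_a, m2rw_b):
--     if len(m2rw_a) != len(m2rw_b):
--         return False
--     a_lists = [sorted(v) for v in m2rw_a.values()]
--     b_lists = [sorted(v) for v in m2rw_b.values()]
--     if sorted(len(l) for l in a_lists) != sorted(len(l) for l in b_lists):
--         return False
--     return all(l in b_lists for l in a_lists)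
-- ===== Notes on version B (the rewrite author's own statement) =====
-- stated objective: simpler
-- what changed: B drops A's grouping of word-lists into per-length buckets of lists-of-lists and the nested per-bucket loop: it sorts each value list once, compares the two multisets of list lengths via sorted(), and does one flat membership pass of a's sorted lists over b's sorted lists (reproducing A's per-length-count plus subset check); B does not mutate its arguments where A sorts the dict's lists in place (return value is what is compared).
import Mathlib
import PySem

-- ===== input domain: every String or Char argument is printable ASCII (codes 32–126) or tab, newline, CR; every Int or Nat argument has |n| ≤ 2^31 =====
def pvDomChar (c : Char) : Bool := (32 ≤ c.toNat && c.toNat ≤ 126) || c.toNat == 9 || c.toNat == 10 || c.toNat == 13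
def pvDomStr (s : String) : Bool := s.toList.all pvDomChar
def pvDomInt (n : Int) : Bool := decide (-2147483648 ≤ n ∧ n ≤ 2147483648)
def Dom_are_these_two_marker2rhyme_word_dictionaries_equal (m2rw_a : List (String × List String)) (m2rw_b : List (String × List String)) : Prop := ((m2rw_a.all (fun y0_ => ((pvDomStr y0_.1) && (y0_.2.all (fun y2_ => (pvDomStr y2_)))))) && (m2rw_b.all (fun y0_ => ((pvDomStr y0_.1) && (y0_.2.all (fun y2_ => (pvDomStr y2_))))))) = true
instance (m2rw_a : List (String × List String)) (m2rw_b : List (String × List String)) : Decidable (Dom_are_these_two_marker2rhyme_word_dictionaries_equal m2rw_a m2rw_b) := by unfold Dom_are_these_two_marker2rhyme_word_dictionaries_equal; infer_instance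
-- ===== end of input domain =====

-- B drops A's per-length buckets-of-lists and nested bucket loop for a flat sorted-lengths + membership check
-- ('simpler'); equivalence is about the RETURN value: A sorts the dicts' word-lists in place, B does not mutate.


-- ===== PORT A =====
-- convert_marker2rw_word_to_len2rw_word_dict: for m in d: rw_list = d[m]; rw_list.sort();
-- "if len not in retval: retval[len] = []; retval[len].append(rw_list)" is retval.modify len [] (· ++ [rw_list])
-- (new keys append at the end, existing keys keep position — exactly Python's dict behaviour).
def pvConvert (d : List (String × List String)) : PySem.Dict Int (List (List String)) :=
  d.foldl (fun retval p =>
    let rw_list := PySem.List.sorted ((PySem.Dict.mk d).getD p.1 []) (fun x => x) false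
    retval.modify ((rw_list.length : Int)) [] (fun l => l ++ [rw_list]))
    PySem.Dict.empty

-- the outer loop "for num_rw in len2rw_a: … except KeyError: return False …"
def pvALoop (la lb : PySem.Dict Int (List (List String))) : List Int → Bool
  | [] => true
  | k :: rest =>
    match lb.get? k with
    | none => false                                  -- KeyError on len2rw_b[num_rw]
    | some list_b =>
      let list_a := la.getD k []
      if list_a.length ≠ list_b.length then false
      else if list_a.all (fun rw => list_b.contains (PySem.List.sorted rw (fun x => x) false)) then
        pvALoop la lb rest
      else false

def are_these_two_marker2rhyme_word_dictionaries_equal (m2rw_a : List (String × List String)) (m2rw_b : List (String × List String)) : Bool :=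
  if m2rw_a.length ≠ m2rw_b.length then false
  else
    let len2rw_a := pvConvert m2rw_a
    let len2rw_b := pvConvert m2rw_b
    pvALoop len2rw_a len2rw_b len2rw_a.keys

-- ===== PORT B =====
def are_these_two_marker2rhyme_word_dictionaries_equal_alt (m2rw_a : List (String × List String)) (m2rw_b : List (String × List String)) : Bool :=
  if m2rw_a.length ≠ m2rw_b.length then false
  else
    let a_lists := ((PySem.Dict.mk m2rw_a).values).map (fun v => PySem.List.sorted v (fun x => x) false)
    let b_lists := ((PySem.Dict.mk m2rw_b).values).map (fun v => PySem.List.sorted v (fun x => x) false)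
    if PySem.List.sorted (a_lists.map (fun l => (l.length : Int))) (fun x => x) false ≠
       PySem.List.sorted (b_lists.map (fun l => (l.length : Int))) (fun x => x) false then false
    else a_lists.all (fun l => b_lists.contains l)

-- ===== PRECONDITION & SPEC =====
-- Pre_ excludes association lists with duplicate marker keys: those do not represent a Python dict
-- (dict construction collapses duplicates before A or B ever runs), so behaviour there is representational only.
def Pre_are_these_two_marker2rhyme_word_dictionaries_equal (m2rw_a : List (String × List String)) (m2rw_b : List (String × List String)) : Prop :=
  (m2rw_a.map Prod.fst).Nodup ∧ (m2rw_b.map Prod.fst).Nodup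
instance (m2rw_a : List (String × List String)) (m2rw_b : List (String × List String)) : Decidable (Pre_are_these_two_marker2rhyme_word_dictionaries_equal m2rw_a m2rw_b) := by unfold Pre_are_these_two_marker2rhyme_word_dictionaries_equal; infer_instance

def pvWitness_are_these_two_marker2rhyme_word_dictionaries_equal : (List (String × List String)) × (List (String × List String)) :=
  ([("AB", ["yun", "chun"])], [("CD", ["chun", "yun"])])

def Spec_are_these_two_marker2rhyme_word_dictionaries_equal (m2rw_a : List (String × List String)) (m2rw_b : List (String × List String)) (out : Bool) : Prop := out = are_these_two_marker2rhyme_word_dictionaries_equal_alt m2rw_a m2rw_b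
instance (m2rw_a : List (String × List String)) (m2rw_b : List (String × List String)) (out : Bool) : Decidable (Spec_are_these_two_marker2rhyme_word_dictionaries_equal m2rw_a m2rw_b out) := by unfold Spec_are_these_two_marker2rhyme_word_dictionaries_equal; infer_instance

-- ===== CLAIM (what is proved, stated in full; the proofs are below) =====
def Claim_equal_are_these_two_marker2rhyme_word_dictionaries_equal : Prop := ∀ (m2rw_a : List (String × List String)) (m2rw_b : List (String × List String)), Dom_are_these_two_marker2rhyme_word_dictionaries_equal m2rw_a m2rw_b → Pre_are_these_two_marker2rhyme_word_dictionaries_equal m2rw_a m2rw_b → Spec_are_these_two_marker2rhyme_word_dictionaries_equal m2rw_a m2rw_b (are_these_two_marker2rhyme_word_dictionaries_equal m2rw_a m2rw_b)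

-- ===== LEMMAS AND PROOFS =====

-- proof-side abbreviations
def pvSl (v : List String) : List String := PySem.List.sorted v (fun x => x) false
def pvSa (a : List (String × List String)) : List (List String) := a.map (fun p => pvSl p.2)
def pvLens (s : List (List String)) : List Int := s.map (fun x => (x.length : Int))
def pvBk (s : List (List String)) (k : Int) : List (List String) := s.filter (fun x => ((x.length : Int) == k))
def pvConvVal (s : List (List String)) : PySem.Dict Int (List (List String)) :=
  s.foldl (fun d x => d.modify ((x.length : Int)) [] (fun l => l ++ [x])) PySem.Dict.empty

lemma pvConvert_eq (a : List (String × List String)) (ha : (a.map Prod.fst).Nodup) :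
    pvConvert a = pvConvVal (pvSa a) := by
  unfold pvConvert pvConvVal pvSa
  rw [List.foldl_map]
  apply PySem.List.foldl_congr_mem
  intro acc p hp
  have hk : (PySem.Dict.mk a).keys.Nodup := by simpa [PySem.Dict.keys] using ha
  have hv : (PySem.Dict.mk a).getD p.1 [] = p.2 := by
    refine PySem.Dict.getD_of_mem_items _ ?_ hk []
    · simpa [PySem.Dict.items] using hp
  simp [hv, pvSl]

lemma pvConvVal_getD (s : List (List String)) (k : Int) :
    (pvConvVal s).getD k [] = pvBk s k := by
  unfold pvConvVal pvBk
  have : (s.foldl (fun d x => d.modify ((x.length : Int)) [] (fun l => l ++ [x])) PySem.Dict.empty)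
      = ((s.map (fun x => ((x.length : Int), x))).foldl
          (fun d p => d.modify p.1 [] (fun l => l ++ [p.2])) PySem.Dict.empty) := by
    rw [List.foldl_map]
  rw [this, PySem.Dict.getD_foldl_modify_append]
  simp [List.filter_map, Function.comp_def, List.map_map]

lemma pvConvVal_keys (s : List (List String)) :
    (pvConvVal s).keys = PySem.Set.ofList (pvLens s) := by
  unfold pvConvVal pvLens
  rw [PySem.Dict.keys_foldl_modify_key s (fun x => ((x.length : Int))) [] (fun _ x => (fun l => l ++ [x]))]
  simp [PySem.Set.update_nil_left]

def pvCheckA (la lb : PySem.Dict Int (List (List String))) (k : Int) : Bool :=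
  match lb.get? k with
  | none => false
  | some list_b =>
    let list_a := la.getD k []
    if list_a.length ≠ list_b.length then false
    else list_a.all (fun rw => list_b.contains (PySem.List.sorted rw (fun x => x) false))

lemma pvALoop_eq_all (la lb : PySem.Dict Int (List (List String))) (ks : List Int) :
    pvALoop la lb ks = ks.all (pvCheckA la lb) := by
  induction ks with
  | nil => rfl
  | cons k rest ih =>
    cases h : lb.get? k with
    | none => simp [pvALoop, pvCheckA, h]
    | some list_b =>
      by_cases hl : (la.getD k []).length = list_b.length
      · simp [pvALoop, pvCheckA, h, hl, ih, List.decide_forall_mem]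
      · simp [pvALoop, pvCheckA, h, hl]

lemma pvBk_length_eq_count (s : List (List String)) (k : Int) :
    (pvBk s k).length = (pvLens s).count k := by
  unfold pvBk pvLens
  rw [← List.countP_eq_length_filter]
  rw [List.count, List.countP_map]
  rfl

lemma pvKey_iff (sa sb : List (List String)) (hlen : sa.length = sb.length) :
    (∀ k ∈ pvLens sa, k ∈ pvLens sb ∧ (pvBk sa k).length = (pvBk sb k).length
        ∧ ∀ x ∈ pvBk sa k, x ∈ pvBk sb k)
    ↔ ((pvLens sa).Perm (pvLens sb) ∧ ∀ x ∈ sa, x ∈ sb) := by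
  constructor
  · intro h
    have hcount : ∀ k, (pvLens sa).count k ≤ (pvLens sb).count k := by
      intro k
      by_cases hk : k ∈ pvLens sa
      · rw [← pvBk_length_eq_count, ← pvBk_length_eq_count, (h k hk).2.1]
      · simp [List.count_eq_zero_of_not_mem hk]
    have hperm : (pvLens sa).Perm (pvLens sb) := by
      have hle : ((pvLens sa : Multiset Int)) ≤ ((pvLens sb : Multiset Int)) :=
        Multiset.le_iff_count.2 (by simpa using hcount)
      have hcard : ((pvLens sb : Multiset Int)).card ≤ ((pvLens sa : Multiset Int)).card := by
        simp [pvLens, hlen]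
      exact Multiset.coe_eq_coe.1 (Multiset.eq_of_le_of_card_le hle hcard)
    refine ⟨hperm, ?_⟩
    intro x hx
    have hxk : x ∈ pvBk sa ((x.length : Int)) := by simp [pvBk, hx]
    have hmem : ((x.length : Int)) ∈ pvLens sa := List.mem_map.2 ⟨x, hx, rfl⟩
    have := (h _ hmem).2.2 x hxk
    exact (List.mem_filter.1 this).1
  · rintro ⟨hperm, hmem⟩ k hk
    have hc := hperm.count_eq k
    refine ⟨?_, ?_, ?_⟩
    · have : 0 < (pvLens sb).count k := by
        rw [← hc]; exact List.count_pos_iff.2 hk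
      exact List.count_pos_iff.1 this
    · rw [pvBk_length_eq_count, pvBk_length_eq_count, hc]
    · intro x hx
      obtain ⟨hxs, hxk⟩ := List.mem_filter.1 hx
      exact List.mem_filter.2 ⟨hmem x hxs, hxk⟩

lemma pvCheckA_iff (sa sb : List (List String)) (k : Int)
    (hs : ∀ x ∈ sa, PySem.List.sorted x (fun y => y) false = x) :
    pvCheckA (pvConvVal sa) (pvConvVal sb) k = true
      ↔ (k ∈ pvLens sb ∧ (pvBk sa k).length = (pvBk sb k).length
          ∧ ∀ x ∈ pvBk sa k, x ∈ pvBk sb k) := by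
  unfold pvCheckA
  cases hg : (pvConvVal sb).get? k with
  | none =>
    have hk : k ∉ (pvConvVal sb).keys := (PySem.Dict.get?_eq_none_iff_not_mem_keys _ _).1 hg
    rw [pvConvVal_keys] at hk
    rw [PySem.Set.mem_ofList] at hk
    simp [hk]
  | some v =>
    have hkmem : k ∈ pvLens sb := by
      by_contra hk
      have : (pvConvVal sb).get? k = none := by
        rw [PySem.Dict.get?_eq_none_iff_not_mem_keys, pvConvVal_keys, PySem.Set.mem_ofList]
        exact hk
      simp [this] at hg
    have hv : v = pvBk sb k := by
      have h1 := pvConvVal_getD sb k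
      rw [PySem.Dict.getD_eq_get?_getD, hg] at h1
      simpa using h1
    subst hv
    rw [pvConvVal_getD]
    simp only [hkmem, true_and]
    constructor
    · intro h
      by_cases hl : (pvBk sa k).length = (pvBk sb k).length
      · refine ⟨hl, ?_⟩
        rw [if_neg (by simpa using hl)] at h
        rw [List.all_eq_true] at h
        intro x hx
        have hxs : x ∈ sa := (List.mem_filter.1 hx).1
        have := h x hx
        rw [hs x hxs] at this
        simpa using this
      · rw [if_pos (by simpa using hl)] at h
        exact absurd h (by simp)
    · rintro ⟨hl, hmem⟩
      rw [if_neg (by simpa using hl)]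
      rw [List.all_eq_true]
      intro x hx
      have hxs : x ∈ sa := (List.mem_filter.1 hx).1
      rw [hs x hxs]
      simpa using hmem x hx

theorem pv_main (a b : List (String × List String))
    (ha : (a.map Prod.fst).Nodup) (hb : (b.map Prod.fst).Nodup) :
    are_these_two_marker2rhyme_word_dictionaries_equal a b
      = are_these_two_marker2rhyme_word_dictionaries_equal_alt a b := by
  unfold are_these_two_marker2rhyme_word_dictionaries_equal
    are_these_two_marker2rhyme_word_dictionaries_equal_alt
  by_cases hlen : a.length = b.length
  · rw [if_neg (by simpa using hlen), if_neg (by simpa using hlen)]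
    rw [pvConvert_eq a ha, pvConvert_eq b hb]
    have hAa : ((PySem.Dict.mk a).values).map (fun v => PySem.List.sorted v (fun x => x) false)
        = pvSa a := by
      simp [pvSa, pvSl, PySem.Dict.values, List.map_map, Function.comp_def]
    have hAb : ((PySem.Dict.mk b).values).map (fun v => PySem.List.sorted v (fun x => x) false)
        = pvSa b := by
      simp [pvSa, pvSl, PySem.Dict.values, List.map_map, Function.comp_def]
    rw [hAa, hAb]
    have hs : ∀ x ∈ pvSa a, PySem.List.sorted x (fun y => y) false = x := by
      intro x hx
      obtain ⟨p, hp, rfl⟩ := List.mem_map.1 hx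
      exact PySem.List.sorted_sorted _ _
    have hslen : (pvSa a).length = (pvSa b).length := by simp [pvSa, hlen]
    rw [pvALoop_eq_all, pvConvVal_keys, Bool.eq_iff_iff, List.all_eq_true]
    have hLmap : ∀ s : List (List String),
        s.map (fun l => ((l.length : Int))) = pvLens s := fun _ => rfl
    constructor
    · intro h
      have hkey := (pvKey_iff _ _ hslen).1 (fun k hk =>
        (pvCheckA_iff _ _ _ hs).1 (h k ((PySem.Set.mem_ofList _ _).2 hk)))
      obtain ⟨hperm, hmem⟩ := hkey
      rw [if_neg (by
        rw [hLmap, hLmap]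
        simp only [ne_eq, not_not]
        exact (PySem.List.sorted_id_eq_sorted_id_iff_perm _ _).2 hperm)]
      rw [List.all_eq_true]
      intro x hx
      simpa using hmem x hx
    · intro h
      by_cases hEq : PySem.List.sorted ((pvSa a).map (fun l => ((l.length : Int)))) (fun x => x) false
          = PySem.List.sorted ((pvSa b).map (fun l => ((l.length : Int)))) (fun x => x) false
      · rw [if_neg (by simpa using hEq), List.all_eq_true] at h
        have hperm : (pvLens (pvSa a)).Perm (pvLens (pvSa b)) := by
          rw [← hLmap, ← hLmap] at *
          exact (PySem.List.sorted_id_eq_sorted_id_iff_perm _ _).1 hEq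
        have hmem : ∀ x ∈ pvSa a, x ∈ pvSa b := by
          intro x hx
          simpa using h x hx
        intro k hk
        exact (pvCheckA_iff _ _ _ hs).2
          ((pvKey_iff _ _ hslen).2 ⟨hperm, hmem⟩ k ((PySem.Set.mem_ofList _ _).1 hk))
      · rw [if_pos (by simpa using hEq)] at h
        exact absurd h (by simp)
  · rw [if_pos (by simpa using hlen), if_pos (by simpa using hlen)]

-- ===== VERDICT (by name: the statement is the Claim_ definition above) =====
theorem are_these_two_marker2rhyme_word_dictionaries_equal_spec : Claim_equal_are_these_two_marker2rhyme_word_dictionaries_equal := by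
  intro m2rw_a m2rw_b _ hpre
  unfold Spec_are_these_two_marker2rhyme_word_dictionaries_equal
  exact pv_main m2rw_a m2rw_b hpre.1 hpre.2
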